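-- pv_equiv track=rewrite | github.com/johnsouto/api-saas-juridico | backend/app/utils/validators.py | is_disposable_email
-- ===== SOURCE A (Python) =====
-- DISPOSABLE_EMAIL_DOMAINS: set[str] = {
--     # Mailinator
--     "mailinator.com",
--     "mailinator.net",
--     "mailinator.org",
--     # 10 Minute Mail
--     "10minutemail.com",
--     "10minutemail.net",
--     "10minutemail.org",
--     "10minutemail.co",
--     # Guerrilla Mail
--     "guerrillamail.com",
--     "guerrillamail.net",
--     "guerrillamail.org",
--     "guerrillamail.de",
--     # YOPmail
--     "yopmail.com",
--     "yopmail.net",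
--     "yopmail.fr",
--     "yopmail.gq",
--     # Temp-Mail / TempMail
--     "temp-mail.org",
--     "tempmail.com",
--     # Others
--     "getnada.com",
--     "maildrop.cc",
-- }
--
-- def is_disposable_email(email: str) -> bool:
--     """
--     Return True if the email domain matches our disposable blacklist.
--
--     This is intentionally a simple check (fast, no external network calls).
--     """
--     if not email:
--         return False
--     parts = email.strip().lower().rsplit("@", 1)
--     if len(parts) != 2:
--         return False
--     domain = parts[1].strip().rstrip(".")
--     if not domain:
--         return False
--
--     # Match either exact domain or subdomain of a disposable provider.
--     for bad in DISPOSABLE_EMAIL_DOMAINS: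
--         if domain == bad or domain.endswith(f".{bad}"):
--             return True
--     return False
-- ===== SOURCE B (Python) =====
-- DISPOSABLE_EMAIL_DOMAINS: set[str] = {
--     "mailinator.com",
--     "mailinator.net",
--     "mailinator.org",
--     "10minutemail.com",
--     "10minutemail.net",
--     "10minutemail.org",
--     "10minutemail.co",
--     "guerrillamail.com",
--     "guerrillamail.net",
--     "guerrillamail.org",
--     "guerrillamail.de",
--     "yopmail.com",
--     "yopmail.net",
--     "yopmail.fr",
--     "yopmail.gq",
--     "temp-mail.org",
--     "tempmail.com",
--     "getnada.com",
--     "maildrop.cc",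
-- }
--
--
-- def is_disposable_email(email: str) -> bool:
--     # Take the part after the LAST '@' via rpartition (empty sep = no '@' at all).
--     _local, sep, after = email.strip().lower().rpartition("@")
--     if not sep:
--         return False
--     domain = after.strip().rstrip(".")
--     if not domain:
--         return False
--     # Exact-domain lookup, then one pass over the domain's characters: each '.'
--     # starts a dot-suffix, which is looked up in the set directly.
--     if domain in DISPOSABLE_EMAIL_DOMAINS:
--         return True
--     for i, ch in enumerate(domain):
--         if ch == "." and domain[i + 1:] in DISPOSABLE_EMAIL_DOMAINS:
--             return True
--     return False
-- ===== Notes on version B (the rewrite author's own statement) =====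
-- stated objective: alternative
-- what changed: B isolates the domain with rpartition instead of rsplit, and replaces A's loop over the whole blacklist with ==/endswith tests by an exact set lookup plus one pass over the domain's own characters that looks each dot-suffix up in the set.
import Mathlib
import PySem

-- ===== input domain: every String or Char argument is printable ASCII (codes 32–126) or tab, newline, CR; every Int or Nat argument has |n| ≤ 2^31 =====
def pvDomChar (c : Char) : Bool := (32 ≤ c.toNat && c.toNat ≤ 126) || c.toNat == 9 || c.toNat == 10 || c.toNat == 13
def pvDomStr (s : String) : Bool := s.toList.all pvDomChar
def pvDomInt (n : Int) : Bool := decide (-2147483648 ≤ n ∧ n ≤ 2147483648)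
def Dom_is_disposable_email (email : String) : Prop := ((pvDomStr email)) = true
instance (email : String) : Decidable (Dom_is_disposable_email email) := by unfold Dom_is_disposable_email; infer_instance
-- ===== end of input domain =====

-- B finds the part after the last '@' by rpartition (ported as a reverse scan) and then
-- does one pass over the domain's own characters, looking each dot-suffix up in the set,
-- instead of A's scan over the whole blacklist with ==/endswith tests (alternative).

-- ===== PORT A =====

-- module constant DISPOSABLE_EMAIL_DOMAINS (a Python set; consumed only order-independently)
def pvDISPOSABLE : PySem.Set (List Char) :=
  PySem.Set.ofList
    [ "mailinator.com".toList, "mailinator.net".toList, "mailinator.org".toList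
    , "10minutemail.com".toList, "10minutemail.net".toList, "10minutemail.org".toList
    , "10minutemail.co".toList
    , "guerrillamail.com".toList, "guerrillamail.net".toList, "guerrillamail.org".toList
    , "guerrillamail.de".toList
    , "yopmail.com".toList, "yopmail.net".toList, "yopmail.fr".toList, "yopmail.gq".toList
    , "temp-mail.org".toList, "tempmail.com".toList
    , "getnada.com".toList, "maildrop.cc".toList ]

-- hand port of s.rsplit("@", 1): split at the LAST '@'; none = no '@' (parts = [s]); exact
def pvRsplitAt : List Char → Option (List Char × List Char)
  | [] => none
  | c :: t =>
    match pvRsplitAt t with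
    | some (p, q) => some (c :: p, q)
    | none => if c = '@' then some ([], t) else none

-- hand port of s.rstrip("."): drop trailing '.' characters; exact
def pvRstripDots (cs : List Char) : List Char := (cs.reverse.dropWhile (· = '.')).reverse

def is_disposable_email (email : String) : Bool :=
  if email.toList = [] then false
  else
    match pvRsplitAt (PySem.Chars.lower (PySem.Chars.strip email.toList)) with
    | none => false   -- len(parts) != 2
    | some (_, p1) =>
      let domain := pvRstripDots (PySem.Chars.strip p1)
      if domain = [] then false
      else pvDISPOSABLE.any (fun bad => domain == bad || PySem.Chars.endswith domain ('.' :: bad))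

-- ===== PORT B =====

-- hand port of s.rpartition("@") restricted to what B consumes: the part after the LAST
-- '@' (none if there is no '@', i.e. sep == "").  Implemented as Python's rpartition is:
-- a scan of the REVERSED string for its first '@', collecting the characters before it.
def pvBeforeFirstAt : List Char → Option (List Char)
  | [] => none
  | c :: t => if c = '@' then some [] else (pvBeforeFirstAt t).map (c :: ·)

def is_disposable_email_alt (email : String) : Bool :=
  match pvBeforeFirstAt (PySem.Chars.lower (PySem.Chars.strip email.toList)).reverse with
  | none => false   -- sep == "": no '@'
  | some r =>
    let domain := pvRstripDots (PySem.Chars.strip r.reverse)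
    if domain = [] then false
    else if PySem.Set.contains pvDISPOSABLE domain then true
    else (PySem.List.enumerate domain).any (fun p =>
      p.2 == '.' && PySem.Set.contains pvDISPOSABLE (PySem.List.slice domain (some (p.1 + 1)) none))

-- ===== PRECONDITION & SPEC =====
def Spec_is_disposable_email (email : String) (out : Bool) : Prop := out = is_disposable_email_alt email
instance (email : String) (out : Bool) : Decidable (Spec_is_disposable_email email out) := by unfold Spec_is_disposable_email; infer_instance

-- ===== CLAIM =====
def Claim_equal_is_disposable_email : Prop := ∀ (email : String), Dom_is_disposable_email email → Spec_is_disposable_email email (is_disposable_email email)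

-- ===== LEMMAS AND PROOFS =====

theorem pvRsplitAt_none : ∀ {cs : List Char}, pvRsplitAt cs = none ↔ ('@' : Char) ∉ cs := by
  intro cs
  induction cs with
  | nil => simp [pvRsplitAt]
  | cons c t ih =>
    simp only [pvRsplitAt, List.mem_cons]
    cases h : pvRsplitAt t with
    | some pq =>
      obtain ⟨p1, p2⟩ := pq
      have hmem : ('@' : Char) ∈ t := by
        by_contra hno
        rw [ih.mpr hno] at h
        cases h
      simp [hmem]
    | none =>
      have hnt := ih.mp h
      by_cases hc : c = '@'
      · subst hc; simp
      · rw [if_neg hc]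
        constructor
        · intro _
          rintro (he | hm)
          · exact hc he.symm
          · exact hnt hm
        · intro _; rfl

theorem pvRsplitAt_some : ∀ {cs p q : List Char}, pvRsplitAt cs = some (p, q) →
    cs = p ++ '@' :: q ∧ ('@' : Char) ∉ q := by
  intro cs
  induction cs with
  | nil => intro p q h; simp [pvRsplitAt] at h
  | cons c t ih =>
    intro p q h
    simp only [pvRsplitAt] at h
    split at h
    · rename_i p' q' heq
      simp only [Option.some.injEq, Prod.mk.injEq] at h
      obtain ⟨h1, h2⟩ := h
      subst h2
      obtain ⟨hEq, hN⟩ := ih heq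
      exact ⟨by rw [← h1]; simp [hEq], hN⟩
    · rename_i heq
      split at h
      · rename_i hc
        simp only [Option.some.injEq, Prod.mk.injEq] at h
        obtain ⟨h1, h2⟩ := h
        subst h1; subst h2
        exact ⟨by simp [hc], pvRsplitAt_none.mp heq⟩
      · cases h

theorem pvBeforeFirstAt_none : ∀ {l : List Char}, pvBeforeFirstAt l = none ↔ ('@' : Char) ∉ l := by
  intro l
  induction l with
  | nil => simp [pvBeforeFirstAt]
  | cons c t ih =>
    simp only [pvBeforeFirstAt, List.mem_cons]
    by_cases hc : c = '@'
    · subst hc; simp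
    · rw [if_neg hc]
      cases h : pvBeforeFirstAt t with
      | some r =>
        have hmem : ('@' : Char) ∈ t := by
          by_contra hno
          rw [ih.mpr hno] at h
          cases h
        simp [hmem]
      | none =>
        have hnt := ih.mp h
        constructor
        · intro _
          rintro (he | hm)
          · exact hc he.symm
          · exact hnt hm
        · intro _; rfl

theorem pvBeforeFirstAt_some : ∀ {l r : List Char}, pvBeforeFirstAt l = some r →
    (∃ t, l = r ++ '@' :: t) ∧ ('@' : Char) ∉ r := by
  intro l
  induction l with
  | nil => intro r h; simp [pvBeforeFirstAt] at h
  | cons c t ih =>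
    intro r h
    simp only [pvBeforeFirstAt] at h
    split at h
    · next hc =>
      simp only [Option.some.injEq] at h
      subst h
      exact ⟨⟨t, by simp [hc]⟩, by simp⟩
    · next hc =>
      cases ht : pvBeforeFirstAt t with
      | none => rw [ht] at h; cases h
      | some r' =>
        rw [ht] at h
        simp only [Option.map_some, Option.some.injEq] at h
        subst h
        obtain ⟨⟨t', rfl⟩, hN⟩ := ih ht
        refine ⟨⟨t', by simp⟩, ?_⟩
        intro hm
        rcases List.mem_cons.mp hm with rfl | hm'
        · exact hc rfl
        · exact hN hm'

-- uniqueness of the segment after the LAST '@'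
theorem lastAt_unique : ∀ {p q p' q' : List Char},
    p ++ '@' :: q = p' ++ '@' :: q' → ('@' : Char) ∉ q → ('@' : Char) ∉ q' → q = q' := by
  intro p q p' q' h hq hq'
  rcases List.append_eq_append_iff.mp h with ⟨a', ha1, ha2⟩ | ⟨c', hc1, hc2⟩
  · cases a' with
    | nil => simpa using ha2
    | cons x xs =>
      exfalso
      have hx : ('@' : Char) = x ∧ q = xs ++ '@' :: q' := by simpa using ha2
      exact hq (by simp [hx.2])
  · cases c' with
    | nil => symm; simpa using hc2
    | cons x xs =>
      exfalso
      have hx : ('@' : Char) = x ∧ q' = xs ++ '@' :: q := by simpa using hc2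
      exact hq' (by simp [hx.2])

-- '.'-bounded suffix ↔ a '.' at index k whose tail is bad
theorem dot_suffix_iff_index (cs bad : List Char) :
    ('.' :: bad <:+ cs) ↔ ∃ (k : Nat) (h : k < cs.length), cs[k] = '.' ∧ cs.drop (k + 1) = bad := by
  constructor
  · rintro ⟨s, hs⟩
    subst hs
    refine ⟨s.length, by simp, ?_, ?_⟩
    · simp
    · rw [show s.length + 1 = s.length + 1 from rfl]
      simp [List.drop_append]
  · rintro ⟨k, hk, hdot, hdrop⟩
    refine ⟨cs.take k, ?_⟩
    conv_rhs => rw [← List.take_append_drop k cs]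
    rw [List.drop_eq_getElem_cons hk, hdot, hdrop]

-- the scan over the blacklist equals exact-lookup-or-dot-suffix-scan
theorem scan_eq (cs : List Char) :
    pvDISPOSABLE.any (fun bad => cs == bad || PySem.Chars.endswith cs ('.' :: bad)) =
      (PySem.Set.contains pvDISPOSABLE cs ||
        (PySem.List.enumerate cs).any (fun p =>
          p.2 == '.' && PySem.Set.contains pvDISPOSABLE (PySem.List.slice cs (some (p.1 + 1)) none))) := by
  rw [Bool.eq_iff_iff]
  simp only [List.any_eq_true, Bool.or_eq_true, Bool.and_eq_true, beq_iff_eq,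
    PySem.Chars.endswith_iff, PySem.Set.contains_iff, PySem.List.mem_enumerate_iff,
    dot_suffix_iff_index]
  constructor
  · rintro ⟨bad, hbad, rfl | ⟨k, hk, hdot, hdrop⟩⟩
    · exact Or.inl hbad
    · refine Or.inr ⟨((k : Int), cs[k]), ⟨k, hk, by simp⟩, hdot, ?_⟩
      have : ((k : Int) + 1) = ((k + 1 : Nat) : Int) := by push_cast; ring
      rw [this, PySem.List.slice_from_natCast, hdrop]
      exact hbad
  · rintro (h | ⟨p, ⟨k, hk, rfl⟩, hdot, hmem⟩)
    · exact ⟨cs, h, Or.inl rfl⟩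
    · simp only at hdot hmem
      have : ((0 : Int) + k + 1) = ((k + 1 : Nat) : Int) := by push_cast; ring
      rw [this, PySem.List.slice_from_natCast] at hmem
      exact ⟨cs.drop (k + 1), hmem, Or.inr ⟨k, hk, hdot, rfl⟩⟩

theorem is_disposable_email_eq (email : String) :
    is_disposable_email email = is_disposable_email_alt email := by
  unfold is_disposable_email is_disposable_email_alt
  by_cases hemp : email.toList = []
  · rw [hemp]; decide
  · rw [if_neg hemp]
    cases h1 : pvRsplitAt (PySem.Chars.lower (PySem.Chars.strip email.toList)) with
    | none =>
      cases h2 : pvBeforeFirstAt (PySem.Chars.lower (PySem.Chars.strip email.toList)).reverse with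
      | none => rfl
      | some r =>
        exfalso
        obtain ⟨⟨t, ht⟩, _⟩ := pvBeforeFirstAt_some h2
        have : ('@' : Char) ∈ (PySem.Chars.lower (PySem.Chars.strip email.toList)) := by
          rw [← List.mem_reverse, ht]; simp
        exact pvRsplitAt_none.mp h1 this
    | some pq =>
      obtain ⟨p, q⟩ := pq
      cases h2 : pvBeforeFirstAt (PySem.Chars.lower (PySem.Chars.strip email.toList)).reverse with
      | none =>
        exfalso
        obtain ⟨hEq, _⟩ := pvRsplitAt_some h1
        have : ('@' : Char) ∈ (PySem.Chars.lower (PySem.Chars.strip email.toList)).reverse := by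
          rw [hEq]; simp
        exact pvBeforeFirstAt_none.mp h2 this
      | some r =>
        obtain ⟨hEq1, hq⟩ := pvRsplitAt_some h1
        obtain ⟨⟨t, ht⟩, hr⟩ := pvBeforeFirstAt_some h2
        have hEq2 : PySem.Chars.lower (PySem.Chars.strip email.toList) = t.reverse ++ '@' :: r.reverse := by
          have := congrArg List.reverse ht
          simpa using this
        have hqr : q = r.reverse := lastAt_unique (hEq1 ▸ hEq2) hq (by simpa using hr)
        subst hqr
        simp only
        split
        · rfl
        · rw [scan_eq]
          cases hc : PySem.Set.contains pvDISPOSABLE (pvRstripDots (PySem.Chars.strip r.reverse))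
          · simp
          · simp

-- ===== VERDICT =====
theorem is_disposable_email_spec : Claim_equal_is_disposable_email := by
  intro email _
  unfold Spec_is_disposable_email
  exact is_disposable_email_eq email
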